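-- pv_equiv track=rewrite | github.com/henryhardigan/contact-alignment | src/mj_align/amino_acid_properties.py | has_charge_run
-- ===== SOURCE A (Python) =====
-- def has_charge_run(seq: str, run_len: int = 3) -> bool:
--     """Detect runs of charged residues in a protein sequence.
--
--     Identifies consecutive stretches of positively charged (K/R) or
--     negatively charged (D/E) amino acids that meet or exceed the
--     specified length threshold.
--
--     Args:
--         seq: Protein sequence (single-letter amino acid codes).
--         run_len: Minimum length of consecutive charged residues to
--             detect. Default is 3.
--
--     Returns:
--         True if the sequence contains a run of positive or negative
--         charges of at least run_len consecutive residues.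
--
--     Example:
--         >>> has_charge_run("ACKKKLM", run_len=3)  # Has KKK run
--         True
--         >>> has_charge_run("ACKKLM", run_len=3)   # KK is only 2
--         False
--         >>> has_charge_run("ACDDDLM", run_len=3)  # Has DDD run
--         True
--     """
--     if run_len <= 1:
--         return False
--     s = seq.strip().upper()
--     count_pos = 0  # Count of consecutive positive charges (K/R)
--     count_neg = 0  # Count of consecutive negative charges (D/E)
--     for c in s:
--         if c in "KR":
--             count_pos += 1
--             count_neg = 0
--         elif c in "DE":
--             count_neg += 1
--             count_pos = 0
--         else:
--             count_pos = 0
--             count_neg = 0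
--         if count_pos >= run_len or count_neg >= run_len:
--             return True
--     return False
-- ===== SOURCE B (Python) =====
-- from itertools import groupby
--
--
-- def has_charge_run(seq: str, run_len: int = 3) -> bool:
--     """Group-first reimplementation: categorise residues and inspect
--     maximal consecutive runs via itertools.groupby."""
--     if run_len <= 1:
--         return False
--
--     def cat(c):
--         return 'p' if c in 'KR' else 'n' if c in 'DE' else 'o'
--
--     for key, grp in groupby(seq.strip().upper(), key=cat):
--         if key != 'o' and sum(1 for _ in grp) >= run_len:
--             return True
--     return False
-- ===== Notes on version B (the rewrite author's own statement) =====
-- stated objective: idiomatic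
-- what changed: Replaced the per-character dual-counter state machine with a group-first pass: residues are categorised (pos/neg/other) and itertools.groupby forms maximal consecutive runs, returning True iff some charged run reaches run_len.
import Mathlib
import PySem

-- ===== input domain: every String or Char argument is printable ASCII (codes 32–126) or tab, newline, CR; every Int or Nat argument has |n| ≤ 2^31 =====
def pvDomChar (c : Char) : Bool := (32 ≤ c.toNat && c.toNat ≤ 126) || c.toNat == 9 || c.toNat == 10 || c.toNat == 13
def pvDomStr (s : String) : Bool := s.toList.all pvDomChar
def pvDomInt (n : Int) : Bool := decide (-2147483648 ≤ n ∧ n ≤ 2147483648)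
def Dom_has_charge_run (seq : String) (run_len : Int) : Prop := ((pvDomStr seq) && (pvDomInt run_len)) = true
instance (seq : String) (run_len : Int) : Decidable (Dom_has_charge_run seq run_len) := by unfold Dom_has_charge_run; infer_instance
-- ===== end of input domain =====

-- B replaces A's per-character dual-counter state machine with a group-first scan
-- over maximal consecutive runs of equal charge category (idiomatic decomposition).


-- ===== PORT A =====
-- A's loop: two running counters (consecutive positives, consecutive negatives),
-- reset on category change, early return once either reaches run_len.
def loopA (rl : Int) : List Char → Int → Int → Bool
  | [], _, _ => false
  | c :: rest, cp, cn =>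
    let s : Int × Int :=
      if c = 'K' ∨ c = 'R' then (cp + 1, 0)
      else if c = 'D' ∨ c = 'E' then (0, cn + 1)
      else (0, 0)
    if rl ≤ s.1 ∨ rl ≤ s.2 then true else loopA rl rest s.1 s.2

def has_charge_run (seq : String) (run_len : Int) : Bool :=
  if run_len ≤ 1 then false
  else loopA run_len (PySem.Chars.upper (PySem.Chars.strip seq.toList)) 0 0

-- ===== PORT B =====
-- charge category: 1 = positive (K/R), 2 = negative (D/E), 0 = other
def chargeCat (c : Char) : Nat :=
  if c = 'K' ∨ c = 'R' then 1 else if c = 'D' ∨ c = 'E' then 2 else 0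

-- B's loop (groupby): peel the maximal leading run of equal category,
-- succeed if it is charged and long enough, else recurse on the remainder.
def loopB (rl : Int) : List Char → Bool
  | [] => false
  | c :: rest =>
    let g := rest.takeWhile (fun d => chargeCat d = chargeCat c)
    if chargeCat c ≠ 0 ∧ rl ≤ (1 + g.length : Int) then true
    else loopB rl (rest.dropWhile (fun d => chargeCat d = chargeCat c))
  termination_by xs => xs.length
  decreasing_by
    simp only [List.length_cons]
    exact Nat.lt_succ_of_le (List.length_dropWhile_le _ _)

def has_charge_run_alt (seq : String) (run_len : Int) : Bool :=
  if run_len ≤ 1 then false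
  else loopB run_len (PySem.Chars.upper (PySem.Chars.strip seq.toList))

-- ===== PRECONDITION & SPEC =====
def Spec_has_charge_run (seq : String) (run_len : Int) (out : Bool) : Prop := out = has_charge_run_alt seq run_len
instance (seq : String) (run_len : Int) (out : Bool) : Decidable (Spec_has_charge_run seq run_len out) := by unfold Spec_has_charge_run; infer_instance

-- ===== CLAIM (what is proved, stated in full; the proofs are below) =====
def Claim_equal_has_charge_run : Prop := ∀ (seq : String) (run_len : Int), Dom_has_charge_run seq run_len → Spec_has_charge_run seq run_len (has_charge_run seq run_len)

-- ===== LEMMAS AND PROOFS =====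

-- stale counters: when the next character is not positive, the pending positive
-- counter is irrelevant (it is reset before any comparison); symmetric for negative.
lemma loopA_stale_pos (rl : Int) (xs : List Char) (cp : Int)
    (h : ∀ c ∈ xs.head?, ¬ (c = 'K' ∨ c = 'R')) :
    loopA rl xs cp 0 = loopA rl xs 0 0 := by
  cases xs with
  | nil => rfl
  | cons c rest =>
    have hc := h c rfl
    simp only [loopA, if_neg hc]

lemma loopA_stale_neg (rl : Int) (xs : List Char) (cn : Int)
    (h : ∀ c ∈ xs.head?, ¬ (c = 'D' ∨ c = 'E')) :
    loopA rl xs 0 cn = loopA rl xs 0 0 := by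
  cases xs with
  | nil => rfl
  | cons c rest =>
    have hc := h c rfl
    by_cases hk : c = 'K' ∨ c = 'R'
    · simp only [loopA, if_pos hk]
    · simp only [loopA, if_neg hk, if_neg hc]

-- A over a run of positive characters: the counter just accumulates its length.
lemma loopA_pos_run (rl : Int) (g : List Char) :
    ∀ (rest : List Char) (cp : Int), 1 ≤ rl → (∀ d ∈ g, d = 'K' ∨ d = 'R') → cp < rl →
    loopA rl (g ++ rest) cp 0 =
      if rl ≤ cp + (g.length : Int) then true else loopA rl rest (cp + (g.length : Int)) 0 := by
  induction g with
  | nil =>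
    intro rest cp _ _ hcp
    simp only [List.nil_append, List.length_nil, Int.natCast_zero, add_zero]
    rw [if_neg (by omega)]
  | cons c g ih =>
    intro rest cp hrl hg hcp
    have hc : c = 'K' ∨ c = 'R' := hg c (by simp)
    simp only [List.cons_append, loopA, if_pos hc, List.length_cons]
    by_cases hdone : rl ≤ cp + 1
    · rw [if_pos (by omega), if_pos (by push_cast; omega)]
    · rw [if_neg (by omega), ih rest (cp + 1) hrl (fun d hd => hg d (by simp [hd])) (by omega)]
      have : cp + 1 + (g.length : Int) = cp + ((g.length : Nat) + 1 : Nat) := by push_cast; ring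
      rw [this]

-- A over a run of negative characters: symmetric.
lemma loopA_neg_run (rl : Int) (g : List Char) :
    ∀ (rest : List Char) (cn : Int), 1 ≤ rl →
    (∀ d ∈ g, (d = 'D' ∨ d = 'E') ∧ ¬ (d = 'K' ∨ d = 'R')) → cn < rl →
    loopA rl (g ++ rest) 0 cn =
      if rl ≤ cn + (g.length : Int) then true else loopA rl rest 0 (cn + (g.length : Int)) := by
  induction g with
  | nil =>
    intro rest cn _ _ hcn
    simp only [List.nil_append, List.length_nil, Int.natCast_zero, add_zero]
    rw [if_neg (by omega)]
  | cons c g ih =>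
    intro rest cn hrl hg hcn
    obtain ⟨hc, hck⟩ := hg c (by simp)
    simp only [List.cons_append, loopA, if_neg hck, if_pos hc, List.length_cons]
    by_cases hdone : rl ≤ cn + 1
    · rw [if_pos (by omega), if_pos (by push_cast; omega)]
    · rw [if_neg (by omega), ih rest (cn + 1) hrl (fun d hd => hg d (by simp [hd])) (by omega)]
      have : cn + 1 + (g.length : Int) = cn + ((g.length : Nat) + 1 : Nat) := by push_cast; ring
      rw [this]

-- A over a run of uncharged characters: both counters stay zero.
lemma loopA_other_run (rl : Int) (g : List Char) (rest : List Char)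
    (hg : ∀ d ∈ g, ¬ (d = 'K' ∨ d = 'R') ∧ ¬ (d = 'D' ∨ d = 'E')) (hrl : 1 ≤ rl) :
    loopA rl (g ++ rest) 0 0 = loopA rl rest 0 0 := by
  induction g with
  | nil => rfl
  | cons c g ih =>
    obtain ⟨h1, h2⟩ := hg c (by simp)
    simp only [List.cons_append, loopA, if_neg h1, if_neg h2]
    rw [if_neg (by omega)]
    exact ih (fun d hd => hg d (by simp [hd]))

lemma chargeCat_eq_one (c : Char) : chargeCat c = 1 ↔ (c = 'K' ∨ c = 'R') := by
  unfold chargeCat; split_ifs <;> simp_all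

lemma chargeCat_eq_two (c : Char) :
    chargeCat c = 2 ↔ ((c = 'D' ∨ c = 'E') ∧ ¬ (c = 'K' ∨ c = 'R')) := by
  unfold chargeCat; split_ifs <;> simp_all

lemma chargeCat_eq_zero (c : Char) :
    chargeCat c = 0 ↔ (¬ (c = 'K' ∨ c = 'R') ∧ ¬ (c = 'D' ∨ c = 'E')) := by
  unfold chargeCat; split_ifs <;> simp_all

-- head of the remainder after a group has a different category
lemma dropWhile_head_ne (p : Char → Bool) (l : List Char) :
    ∀ c ∈ (l.dropWhile p).head?, p c = false := by
  intro c hc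
  cases hl : l.dropWhile p with
  | nil => simp [hl] at hc
  | cons d rest =>
    rw [hl] at hc
    simp only [List.head?_cons, Option.mem_some_iff] at hc
    subst hc
    have h := List.head_dropWhile_not p (l := l) (by simp [hl])
    simpa [List.head_eq_iff_head?_eq_some, hl] using h

-- main loop equivalence, by strong induction on the list (one group per step)
lemma loopA_eq_loopB (rl : Int) (hrl : 2 ≤ rl) :
    ∀ xs : List Char, loopA rl xs 0 0 = loopB rl xs := by
  intro xs
  induction hn : xs.length using Nat.strong_induction_on generalizing xs with
  | _ n ih =>
    subst hn
    cases xs with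
    | nil => simp [loopA, loopB]
    | cons c rest =>
      set p : Char → Bool := (fun d => decide (chargeCat d = chargeCat c)) with hp
      have hsplit : rest = rest.takeWhile p ++ rest.dropWhile p :=
        (List.takeWhile_append_dropWhile).symm
      have hlen : (rest.dropWhile p).length < (c :: rest).length := by
        simp only [List.length_cons]
        exact Nat.lt_succ_of_le (List.length_dropWhile_le _ _)
      have hg : ∀ d ∈ rest.takeWhile p, chargeCat d = chargeCat c := by
        intro d hd
        have := List.mem_takeWhile_imp hd
        simpa [hp] using this
      have hIH := ih _ hlen _ rfl
      have hBrec : loopB rl (c :: rest) =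
          if chargeCat c ≠ 0 ∧ rl ≤ (1 + (rest.takeWhile p).length : Int) then true
          else loopB rl (rest.dropWhile p) := by
        rw [loopB]
      have hcase : chargeCat c = 0 ∨ chargeCat c = 1 ∨ chargeCat c = 2 := by
        unfold chargeCat; split_ifs <;> simp
      rcases hcase with hcc | hcc | hcc
      · -- other
        have hgrp : ∀ d ∈ c :: rest.takeWhile p,
            ¬ (d = 'K' ∨ d = 'R') ∧ ¬ (d = 'D' ∨ d = 'E') := by
          intro d hd
          rcases List.mem_cons.mp hd with h | h
          · rw [h]; exact (chargeCat_eq_zero c).mp hcc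
          · exact (chargeCat_eq_zero d).mp ((hg d h).trans hcc)
        have hA : loopA rl (c :: rest) 0 0 = loopA rl (rest.dropWhile p) 0 0 := by
          conv_lhs => rw [show c :: rest = (c :: rest.takeWhile p) ++ rest.dropWhile p by
            simp [← hsplit]]
          exact loopA_other_run rl _ _ hgrp (by omega)
        rw [hA, hIH, hBrec, if_neg (by simp [hcc])]
      · -- positive
        have hgrp : ∀ d ∈ c :: rest.takeWhile p, d = 'K' ∨ d = 'R' := by
          intro d hd
          rcases List.mem_cons.mp hd with h | h
          · rw [h]; exact (chargeCat_eq_one c).mp hcc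
          · exact (chargeCat_eq_one d).mp ((hg d h).trans hcc)
        have hA : loopA rl (c :: rest) 0 0 =
            if rl ≤ (0 : Int) + ((c :: rest.takeWhile p).length : Int) then true
            else loopA rl (rest.dropWhile p) ((0 : Int) + ((c :: rest.takeWhile p).length : Int)) 0 := by
          conv_lhs => rw [show c :: rest = (c :: rest.takeWhile p) ++ rest.dropWhile p by
            simp [← hsplit]]
          exact loopA_pos_run rl _ _ 0 (by omega) hgrp (by omega)
        rw [hA, hBrec]
        by_cases hlong : rl ≤ (1 + (rest.takeWhile p).length : Int)
        · rw [if_pos (by simp only [List.length_cons]; push_cast; omega),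
            if_pos ⟨by simp [hcc], hlong⟩]
        · rw [if_neg (by simp only [List.length_cons]; push_cast; omega),
            if_neg (by intro h; exact hlong h.2)]
          rw [loopA_stale_pos rl _ _ ?hhead, hIH]
          case hhead =>
            intro d hd hdKR
            have hpd := dropWhile_head_ne p rest d hd
            have hd1 : chargeCat d = 1 := (chargeCat_eq_one d).mpr hdKR
            simp [hp, hd1, hcc] at hpd
      · -- negative
        have hgrp : ∀ d ∈ c :: rest.takeWhile p,
            (d = 'D' ∨ d = 'E') ∧ ¬ (d = 'K' ∨ d = 'R') := by
          intro d hd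
          rcases List.mem_cons.mp hd with h | h
          · rw [h]; exact (chargeCat_eq_two c).mp hcc
          · exact (chargeCat_eq_two d).mp ((hg d h).trans hcc)
        have hA : loopA rl (c :: rest) 0 0 =
            if rl ≤ (0 : Int) + ((c :: rest.takeWhile p).length : Int) then true
            else loopA rl (rest.dropWhile p) 0 ((0 : Int) + ((c :: rest.takeWhile p).length : Int)) := by
          conv_lhs => rw [show c :: rest = (c :: rest.takeWhile p) ++ rest.dropWhile p by
            simp [← hsplit]]
          exact loopA_neg_run rl _ _ 0 (by omega) hgrp (by omega)
        rw [hA, hBrec]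
        by_cases hlong : rl ≤ (1 + (rest.takeWhile p).length : Int)
        · rw [if_pos (by simp only [List.length_cons]; push_cast; omega),
            if_pos ⟨by simp [hcc], hlong⟩]
        · rw [if_neg (by simp only [List.length_cons]; push_cast; omega),
            if_neg (by intro h; exact hlong h.2)]
          rw [loopA_stale_neg rl _ _ ?hhead, hIH]
          case hhead =>
            intro d hd hdDE
            have hpd := dropWhile_head_ne p rest d hd
            have hdK : ¬ (d = 'K' ∨ d = 'R') := by
              rcases hdDE with h | h <;> subst h <;> decide
            have hd2 : chargeCat d = 2 := (chargeCat_eq_two d).mpr ⟨hdDE, hdK⟩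
            simp [hp, hd2, hcc] at hpd

-- ===== VERDICT (by name: the statement is the Claim_ definition above) =====
theorem has_charge_run_spec : Claim_equal_has_charge_run := by
  intro seq run_len _
  unfold Spec_has_charge_run has_charge_run has_charge_run_alt
  by_cases h : run_len ≤ 1
  · rw [if_pos h, if_pos h]
  · rw [if_neg h, if_neg h]
    exact loopA_eq_loopB run_len (by omega) _
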